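-- pv_equiv track=rewrite | github.com/null-a/pyro | pyro/contrib/brm/fit.py | layout_table
-- ===== SOURCE A (Python) =====
-- def layout_table(rows):
--     out = []
--     num_rows = len(rows)
--     assert num_rows > 0
--     num_cols = len(rows[0])
--     assert all(len(row) == num_cols for row in rows)
--     max_widths = [0] * num_cols
--     for row in rows:
--         for i, cell in enumerate(row):
--             max_widths[i] = max(max_widths[i], len(cell))
--     fmt = ' '.join('{{:>{}}}'.format(mw) for mw in max_widths)
--     return '\n'.join(fmt.format(*row) for row in rows)
-- ===== SOURCE B (Python) =====
-- def layout_table(rows):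
--     assert len(rows) > 0
--     num_cols = len(rows[0])
--     assert all(len(row) == num_cols for row in rows)
--     # Build the output column-by-column: every line grows one padded column at a time.
--     lines = [''] * len(rows)
--     for j in range(num_cols):
--         col = [row[j] for row in rows]
--         w = max(map(len, col))
--         sep = '' if j == 0 else ' '
--         lines = [line + sep + cell.rjust(w) for line, cell in zip(lines, col)]
--     return '\n'.join(lines)
-- ===== Notes on version B (the rewrite author's own statement) =====
-- stated objective: alternative
-- what changed: B constructs the table column-by-column, growing every output line by one right-padded column per iteration, instead of A's two-stage row-major pipeline (running-max widths pass, then a combined format string applied per row).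
import Mathlib
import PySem

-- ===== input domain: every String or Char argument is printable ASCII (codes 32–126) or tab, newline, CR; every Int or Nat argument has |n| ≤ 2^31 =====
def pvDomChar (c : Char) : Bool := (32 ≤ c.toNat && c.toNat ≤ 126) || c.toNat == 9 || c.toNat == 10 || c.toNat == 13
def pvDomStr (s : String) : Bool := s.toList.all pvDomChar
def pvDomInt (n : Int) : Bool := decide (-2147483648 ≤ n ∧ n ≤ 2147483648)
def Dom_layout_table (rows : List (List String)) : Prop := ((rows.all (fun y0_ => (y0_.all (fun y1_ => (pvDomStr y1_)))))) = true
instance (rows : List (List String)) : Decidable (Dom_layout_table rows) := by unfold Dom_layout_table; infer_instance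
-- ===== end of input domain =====

-- B builds the output column-by-column (each line grows one padded column at a time)
-- instead of A's row-major widths pass plus a combined format string: alternative decomposition.
-- Pre_ excludes exactly the inputs on which A's asserts raise (empty table, ragged rows).


-- ===== PORT A =====
-- '{:>w}'.format(cell) for a string cell: left-pad with spaces to width w (exact on ASCII strings)
def padA (w : Nat) (c : String) : String :=
  String.ofList (List.replicate (w - c.toList.length) ' ' ++ c.toList)

def layout_table (rows : List (List String)) : String :=
  -- num_cols = len(rows[0]); Pre_ guarantees rows ≠ [] (A asserts num_rows > 0)
  let numCols := (rows.headD []).length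
  -- the nested for-loop: running max-widths accumulator updated row by row
  let maxWidths := rows.foldl
    (fun mw row => List.zipWith (fun m c => max m c.toList.length) mw row)
    (List.replicate numCols 0)
  -- fmt = ' '.join of '{:>mw}' fields; fmt.format(*row) applied per row
  PySem.Str.join "\n"
    (rows.map (fun row => PySem.Str.join " " (List.zipWith (fun mw c => padA mw c) maxWidths row)))

-- ===== PORT B =====
-- cell.rjust(w): left-pad cell with spaces to width w (exact on ASCII strings)
def rjust (cell : String) (w : Nat) : String :=
  String.ofList (List.replicate (w - cell.toList.length) ' ' ++ cell.toList)

def layout_table_alt (rows : List (List String)) : String :=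
  let numCols := (rows.headD []).length
  -- column-by-column: every line grows one padded column per iteration
  let lines := (List.range numCols).foldl
    (fun lines j =>
      let col := rows.map (fun row => row.getD j "")
      -- max(map(len, col)); col nonempty under Pre_, ported as foldl max 0 on Nat lengths
      let w := col.foldl (fun m c => max m c.toList.length) 0
      let sep := if j == 0 then "" else " "
      List.zipWith (fun line cell => line ++ sep ++ rjust cell w) lines col)
    (List.replicate rows.length "")
  PySem.Str.join "\n" lines

-- ===== PRECONDITION & SPEC =====
-- Pre_ excludes exactly the inputs on which A's asserts raise AssertionError:
-- the empty row list and ragged tables (rows of unequal length). B asserts the same.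
def Pre_layout_table (rows : List (List String)) : Prop :=
  rows ≠ [] ∧ ∀ r ∈ rows, r.length = (rows.headD []).length
instance (rows : List (List String)) : Decidable (Pre_layout_table rows) := by
  unfold Pre_layout_table; infer_instance

def pvWitness_layout_table : List (List String) := [["a", "bb"], ["ccc", "d"]]

def Spec_layout_table (rows : List (List String)) (out : String) : Prop := out = layout_table_alt rows
instance (rows : List (List String)) (out : String) : Decidable (Spec_layout_table rows out) := by unfold Spec_layout_table; infer_instance

-- ===== CLAIM (what is proved, stated in full; the proofs are below) =====
def Claim_equal_layout_table : Prop := ∀ (rows : List (List String)), Dom_layout_table rows → Pre_layout_table rows → Spec_layout_table rows (layout_table rows)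

-- ===== LEMMAS AND PROOFS =====

-- A's running-max accumulator equals the per-column maxima, for uniform-width rows.
theorem widths_eq (rows : List (List String)) (init : List Nat)
    (h : ∀ r ∈ rows, r.length = init.length) :
    rows.foldl (fun mw row => List.zipWith (fun m c => max m c.toList.length) mw row) init
      = (List.range init.length).map
          (fun i => rows.foldl (fun m row => max m (row.getD i "").toList.length) (init.getD i 0)) := by
  induction rows generalizing init with
  | nil =>
      simp only [List.foldl_nil]
      apply List.ext_getElem
      · simp
      · intro i h1 h2
        simp [List.getD_eq_getElem?_getD, List.getElem?_eq_getElem h1]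
  | cons r rs ih =>
      simp only [List.foldl_cons]
      have hr : r.length = init.length := h r (by simp)
      have hlen : (List.zipWith (fun m c => max m c.toList.length) init r).length = init.length := by
        simp [hr]
      rw [ih _ (by intro x hx; rw [hlen]; exact h x (by simp [hx]))]
      rw [hlen]
      apply List.map_congr_left
      intro i hi
      have hi' : i < init.length := List.mem_range.mp hi
      congr 1
      have : (List.zipWith (fun m c => max m c.toList.length) init r).getD i 0
          = max (init.getD i 0) ((r.getD i "").toList.length) := by
        have hri : i < r.length := hr ▸ hi'
        simp [List.getD_eq_getElem?_getD, List.getElem?_zipWith,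
          List.getElem?_eq_getElem hi', List.getElem?_eq_getElem hri]
      rw [this]

-- zipWith over a snoc on the left, when the right list is long enough
theorem zipWith_snoc_left {α β : Type} (f : Nat → α → β) (ws : List Nat) (w : Nat)
    (l : List α) (d : α) (h : ws.length < l.length) :
    List.zipWith f (ws ++ [w]) l = List.zipWith f ws l ++ [f w (l.getD ws.length d)] := by
  induction ws generalizing l with
  | nil => cases l with
    | nil => simp at h
    | cons a l' => simp [List.getD]
  | cons x xs ih =>
      cases l with
      | nil => simp at h
      | cons a l' =>
          simp only [List.cons_append, List.zipWith_cons_cons]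
          rw [ih l' (by simpa using h)]
          simp

-- ' '.join over a snoc of a nonempty list (char level, then string level)
theorem chars_join_snoc (sep : List Char) (xs : List (List Char)) (y : List Char) (h : xs ≠ []) :
    PySem.Chars.join sep (xs ++ [y]) = PySem.Chars.join sep xs ++ sep ++ y := by
  induction xs with
  | nil => simp at h
  | cons a l ih =>
      cases l with
      | nil => simp [PySem.Chars.join_cons_cons, PySem.Chars.join_singleton]
      | cons b l' =>
          simp only [List.cons_append, PySem.Chars.join_cons_cons]
          rw [← List.cons_append, ih (by simp)]
          simp [List.append_assoc]

theorem join_snoc (xs : List String) (y : String) (h : xs ≠ []) :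
    PySem.Str.join " " (xs ++ [y]) = PySem.Str.join " " xs ++ " " ++ y := by
  rw [← String.toList_inj]
  simp only [PySem.Str.toList_join, String.toList_append, List.map_append, List.map_cons,
    List.map_nil]
  exact chars_join_snoc _ _ _ (by simpa using h)

-- zipWith of two maps over the same list is a map
theorem zipWith_map_self {α β γ δ : Type} (f : β → γ → δ) (g : α → β) (h : α → γ) (l : List α) :
    List.zipWith f (l.map g) (l.map h) = l.map (fun x => f (g x) (h x)) := by
  induction l with
  | nil => rfl
  | cons a l ih => simp [ih]

-- per-column maxima, as A reaches them
def Wd (rows : List (List String)) (j : Nat) : Nat :=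
  rows.foldl (fun m row => max m (row.getD j "").toList.length) 0

-- invariant of B's column loop: after k columns every line is the rendering of the first k cells
theorem lines_inv (rows : List (List String)) (k : Nat)
    (hk : ∀ r ∈ rows, k ≤ r.length) :
    (List.range k).foldl
      (fun lines j =>
        let col := rows.map (fun row => row.getD j "")
        let w := col.foldl (fun m c => max m c.toList.length) 0
        let sep := if j == 0 then "" else " "
        List.zipWith (fun line cell => line ++ sep ++ rjust cell w) lines col)
      (List.replicate rows.length "")
    = rows.map (fun row =>
        PySem.Str.join " " (List.zipWith (fun mw c => padA mw c) ((List.range k).map (Wd rows)) row)) := by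
  induction k with
  | zero =>
      have : PySem.Str.join " " ([] : List String) = "" := rfl
      simp [this, List.map_const']
  | succ k ih =>
      rw [List.range_succ, List.foldl_append, ih (fun r hr => Nat.le_of_succ_le (hk r hr))]
      simp only [List.foldl_cons, List.foldl_nil, List.map_append, List.map_cons, List.map_nil]
      rw [List.foldl_map]
      rw [zipWith_map_self]
      apply List.map_congr_left
      intro row hrow
      have hlen : k < row.length := hk row hrow
      have hwl : ((List.range k).map (Wd rows)).length = k := by simp
      rw [zipWith_snoc_left (fun mw c => padA mw c) _ _ row "" (by rw [hwl]; exact hlen)]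
      rw [hwl]
      cases k with
      | zero =>
          have h1 : ∀ y : String, PySem.Str.join " " [y] = y := by
            intro y; rw [← String.toList_inj]
            simp [PySem.Str.toList_join, PySem.Chars.join_singleton]
          simp [h1]
          rfl
      | succ m =>
          have hne : List.zipWith (fun mw c => padA mw c) ((List.range (m+1)).map (Wd rows)) row ≠ [] := by
            have hl : (List.zipWith (fun mw c => padA mw c) ((List.range (m+1)).map (Wd rows)) row).length
                = m + 1 := by simp; omega
            intro hcon; rw [hcon] at hl; simp at hl
          rw [join_snoc _ _ hne]
          simp
          rfl

-- ===== VERDICT (by name: the statement is the Claim_ definition above) =====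
theorem layout_table_spec : Claim_equal_layout_table := by
  intro rows _ hpre
  obtain ⟨hne, huni⟩ := hpre
  unfold Spec_layout_table layout_table layout_table_alt
  simp only
  rw [widths_eq rows (List.replicate (rows.headD []).length 0)
      (by intro r hr; simpa using huni r hr)]
  simp only [List.length_replicate]
  have hW : (List.range (rows.headD []).length).map
      (fun i => rows.foldl (fun m row => max m (row.getD i "").toList.length)
        ((List.replicate (rows.headD []).length 0).getD i 0))
    = (List.range (rows.headD []).length).map (Wd rows) := by
    apply List.map_congr_left
    intro i hi
    unfold Wd
    congr 1
    simp only [List.getD_eq_getElem?_getD, List.getElem?_replicate]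
    split <;> rfl
  rw [hW]
  rw [lines_inv rows (rows.headD []).length
      (fun r hr => by rw [huni r hr])]
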